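-- pv_equiv track=rewrite | github.com/arek-grows/Challenges | Challenge231.py | advanced_sort
-- ===== SOURCE A (Python) =====
-- from typing import TypeVar
--
-- T = TypeVar("T")
--
-- def advanced_sort(lst: list[T]) -> list[list[T]]:
--     accounted_for = []
--     end_list = []
--     for i in lst:
--         if i not in accounted_for:
--             end_list.append([i] * lst.count(i))
--             accounted_for.append(i)
--     return end_list  # Put your code here!!!
-- ===== SOURCE B (Python) =====
-- def advanced_sort(lst):
--     groups = []
--     for i in lst:
--         for g in groups:
--             if g[0] == i:
--                 g.append(i)
--                 break
--         else:
--             groups.append([i])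
--     return groups
-- ===== Notes on version B (the rewrite author's own statement) =====
-- stated objective: alternative
-- what changed: Single pass that builds the groups incrementally (append each element to the first group whose head equals it, or open a new group), replacing A's seen-list membership test plus a full lst.count scan per distinct element.
import Mathlib
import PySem

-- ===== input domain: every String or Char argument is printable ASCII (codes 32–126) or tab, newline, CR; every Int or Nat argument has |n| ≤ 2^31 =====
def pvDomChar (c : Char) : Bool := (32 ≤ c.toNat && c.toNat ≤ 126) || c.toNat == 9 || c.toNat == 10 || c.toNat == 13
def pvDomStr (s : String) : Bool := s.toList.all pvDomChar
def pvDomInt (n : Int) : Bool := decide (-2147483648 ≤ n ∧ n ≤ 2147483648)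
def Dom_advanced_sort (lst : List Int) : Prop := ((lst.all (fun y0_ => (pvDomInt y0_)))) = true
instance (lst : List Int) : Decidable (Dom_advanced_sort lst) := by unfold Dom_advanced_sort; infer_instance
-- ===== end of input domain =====

-- B replaces A's seen-list + per-element full-list count by a single pass that grows the
-- groups in place (alternative decomposition, same cost).

-- ===== PORT A =====
-- state = (accounted_for, end_list); '[i] * lst.count(i)' = List.replicate (lst.count i) i
def advanced_sort (lst : List Int) : List (List Int) :=
  (lst.foldl
    (fun (st : List Int × List (List Int)) i =>
      if i ∈ st.1 then st
      else (st.1 ++ [i], st.2 ++ [List.replicate (lst.count i) i]))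
    ([], [])).2

-- ===== PORT B =====
-- inner for/else loop over groups: append i to the first group g with g[0] == i, else open [i]
def bStep (groups : List (List Int)) (i : Int) : List (List Int) :=
  match groups with
  | [] => [[i]]
  | g :: gs => if g.headI = i then (g ++ [i]) :: gs else g :: bStep gs i

def advanced_sort_alt (lst : List Int) : List (List Int) :=
  lst.foldl bStep []

-- ===== PRECONDITION & SPEC =====
def Spec_advanced_sort (lst : List Int) (out : List (List Int)) : Prop := out = advanced_sort_alt lst
instance (lst : List Int) (out : List (List Int)) : Decidable (Spec_advanced_sort lst out) := by unfold Spec_advanced_sort; infer_instance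

-- ===== CLAIM (what is proved, stated in full; the proofs are below) =====
def Claim_equal_advanced_sort : Prop := ∀ (lst : List Int), Dom_advanced_sort lst → Spec_advanced_sort lst (advanced_sort lst)

-- ===== LEMMAS AND PROOFS =====

-- distinct elements of rest not already in seen, in first-appearance order
def dNew (seen rest : List Int) : List Int :=
  match rest with
  | [] => []
  | i :: r => if i ∈ seen then dNew seen r else i :: dNew (seen ++ [i]) r

theorem aFold (lst rest seen : List Int) (out : List (List Int)) :
    rest.foldl
      (fun (st : List Int × List (List Int)) i =>
        if i ∈ st.1 then st
        else (st.1 ++ [i], st.2 ++ [List.replicate (lst.count i) i]))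
      (seen, out)
    = (seen ++ dNew seen rest,
       out ++ (dNew seen rest).map (fun x => List.replicate (lst.count x) x)) := by
  induction rest generalizing seen out with
  | nil => simp [dNew]
  | cons i r ih =>
    simp only [List.foldl_cons, dNew]
    by_cases h : i ∈ seen
    · simp [h, ih]
    · simp [h, ih, List.append_assoc]

theorem bStep_mem (seen : List Int) (f : Int → Nat) (i : Int)
    (hf : ∀ x ∈ seen, 1 ≤ f x) (hnd : seen.Nodup) (hi : i ∈ seen) :
    bStep (seen.map (fun x => List.replicate (f x) x)) i
    = seen.map (fun x => List.replicate (f x + if x = i then 1 else 0) x) := by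
  induction seen with
  | nil => simp at hi
  | cons y ys ih =>
    have hy : 1 ≤ f y := hf y (List.mem_cons_self ..)
    have hhead : (List.replicate (f y) y).headI = y := by
      cases h : f y with
      | zero => omega
      | succ n => simp [List.replicate]
    simp only [List.map_cons, bStep, hhead]
    by_cases hyi : y = i
    · subst hyi
      have hyys : y ∉ ys := (List.nodup_cons.mp hnd).1
      have hrep : List.replicate (f y) y ++ [y] = List.replicate (f y + 1) y := by
        simp [List.replicate_succ']
      simp only [if_true, hrep]
      congr 1
      exact (List.map_congr_left (fun x hx => by
        have : x ≠ y := fun h => hyys (h ▸ hx)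
        simp [this])).symm
    · have hi' : i ∈ ys := by rcases List.mem_cons.mp hi with rfl | h; exact absurd rfl hyi; exact h
      rw [if_neg hyi, ih (fun x hx => hf x (List.mem_cons_of_mem _ hx)) (List.nodup_cons.mp hnd).2 hi']
      simp [hyi]

theorem bStep_not_mem (seen : List Int) (f : Int → Nat) (i : Int)
    (hf : ∀ x ∈ seen, 1 ≤ f x) (hi : i ∉ seen) :
    bStep (seen.map (fun x => List.replicate (f x) x)) i
    = (seen ++ [i]).map (fun x => List.replicate (if x = i then 1 else f x) x) := by
  induction seen with
  | nil => simp [bStep]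
  | cons y ys ih =>
    have hy : 1 ≤ f y := hf y (List.mem_cons_self ..)
    have hhead : (List.replicate (f y) y).headI = y := by
      cases h : f y with
      | zero => omega
      | succ n => simp [List.replicate]
    have hyi : y ≠ i := fun h => hi (h ▸ List.mem_cons_self ..)
    simp only [List.map_cons, bStep, hhead, if_neg hyi]
    rw [ih (fun x hx => hf x (List.mem_cons_of_mem _ hx)) (fun h => hi (List.mem_cons_of_mem _ h))]
    simp [hyi]

theorem bFold (rest seen : List Int) (f : Int → Nat)
    (hf1 : ∀ x ∈ seen, 1 ≤ f x) (hf0 : ∀ x, x ∉ seen → f x = 0) (hnd : seen.Nodup) :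
    rest.foldl bStep (seen.map (fun x => List.replicate (f x) x))
    = (seen ++ dNew seen rest).map (fun x => List.replicate (f x + rest.count x) x) := by
  induction rest generalizing seen f with
  | nil => simp [dNew]
  | cons i r ih =>
    simp only [List.foldl_cons, dNew]
    by_cases h : i ∈ seen
    · rw [bStep_mem seen f i hf1 hnd h,
        ih seen (fun x => f x + if x = i then 1 else 0)
          (fun x hx => le_trans (hf1 x hx) (Nat.le_add_right _ _))
          (fun x hx => by
            have : x ≠ i := fun he => hx (he ▸ h)
            simp [this, hf0 x hx]) hnd]
      rw [if_pos h]
      apply List.map_congr_left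
      intro x _
      have hc : (i :: r).count x = r.count x + (if x = i then 1 else 0) := by
        rw [List.count_cons]
        by_cases hxi : x = i
        · simp [hxi]
        · have hix : ¬ i = x := fun he => hxi he.symm
          simp [hxi, hix]
      rw [hc]; congr 1; omega
    · rw [bStep_not_mem seen f i hf1 h]
      rw [ih (seen ++ [i]) (fun x => if x = i then 1 else f x)
          (fun x hx => by
            rcases List.mem_append.mp hx with hx | hx
            · have : x ≠ i := fun he => h (he ▸ hx)
              simpa [this] using hf1 x hx
            · simp at hx; simp [hx])
          (fun x hx => by
            simp only [List.mem_append, not_or, List.mem_singleton] at hx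
            simp [hx.2, hf0 x hx.1])
          (by
            simp [List.nodup_append, hnd]
            intro a ha he
            exact h (he ▸ ha))]
      rw [if_neg h]
      have hl : seen ++ [i] ++ dNew (seen ++ [i]) r = seen ++ i :: dNew (seen ++ [i]) r := by
        simp
      rw [hl]
      apply List.map_congr_left
      intro x hx
      have hc : (i :: r).count x = r.count x + (if x = i then 1 else 0) := by
        rw [List.count_cons]
        by_cases hxi : x = i
        · simp [hxi]
        · have hix : ¬ i = x := fun he => hxi he.symm
          simp [hxi, hix]
      rw [hc]
      by_cases hxi : x = i
      · subst hxi
        simp [hf0 x h, Nat.add_comm]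
      · simp [hxi]

-- ===== VERDICT (by name: the statement is the Claim_ definition above) =====
theorem advanced_sort_spec : Claim_equal_advanced_sort := by
  intro lst _
  unfold Spec_advanced_sort advanced_sort advanced_sort_alt
  rw [aFold lst lst [] []]
  have := bFold lst [] (fun _ => 0) (by simp) (by simp) (by simp)
  simp only [List.map_nil, List.nil_append, Nat.zero_add] at this ⊢
  rw [this]
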